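-- pv_equiv track=rewrite | github.com/semcod/algitex | src/algitex/nlp/__init__.py | _fallback_sort_imports
-- ===== SOURCE A (Python) =====
-- def _fallback_sort_imports(source: str) -> str:
--     lines = source.splitlines()
--     output: list[str] = []
--     index = 0
--
--     while index < len(lines):
--         line = lines[index]
--         stripped = line.lstrip()
--         if stripped.startswith(("import ", "from ")):
--             block = [line]
--             index += 1
--             while index < len(lines):
--                 next_line = lines[index]
--                 next_stripped = next_line.lstrip()
--                 if not next_line.strip():
--                     break
--                 if next_stripped.startswith(("import ", "from ")):
--                     block.append(next_line)
--                     index += 1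
--                     continue
--                 break
--             output.extend(sorted(block, key=lambda item: item.strip().lower()))
--             continue
--
--         output.append(line)
--         index += 1
--
--     return _ensure_trailing_newline("\n".join(output))
--
-- def _ensure_trailing_newline(text: str) -> str:
--     return text if text.endswith("\n") else text + "\n"
-- ===== SOURCE B (Python) =====
-- def _fallback_sort_imports(source: str) -> str:
--     def is_import(line: str) -> bool:
--         return line.lstrip().startswith(("import ", "from "))
--
--     # Single pass: build runs (flag, lines); consecutive import lines merge into one run.
--     runs: list[tuple[bool, list[str]]] = []
--     for line in source.splitlines():
--         flag = is_import(line)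
--         if flag and runs and runs[-1][0]:
--             runs[-1][1].append(line)
--         else:
--             runs.append((flag, [line]))
--
--     out: list[str] = []
--     for flag, chunk in runs:
--         out.extend(sorted(chunk, key=lambda s: s.strip().lower()) if flag else chunk)
--
--     text = "\n".join(out)
--     return text if text.endswith("\n") else text + "\n"
-- ===== Notes on version B (the rewrite author's own statement) =====
-- stated objective: idiomatic
-- what changed: Replaced the manual index/nested-while scan with a single run-forming pass that merges consecutive import lines into runs and then flattens the runs, sorting each import run.
import Mathlib
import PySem

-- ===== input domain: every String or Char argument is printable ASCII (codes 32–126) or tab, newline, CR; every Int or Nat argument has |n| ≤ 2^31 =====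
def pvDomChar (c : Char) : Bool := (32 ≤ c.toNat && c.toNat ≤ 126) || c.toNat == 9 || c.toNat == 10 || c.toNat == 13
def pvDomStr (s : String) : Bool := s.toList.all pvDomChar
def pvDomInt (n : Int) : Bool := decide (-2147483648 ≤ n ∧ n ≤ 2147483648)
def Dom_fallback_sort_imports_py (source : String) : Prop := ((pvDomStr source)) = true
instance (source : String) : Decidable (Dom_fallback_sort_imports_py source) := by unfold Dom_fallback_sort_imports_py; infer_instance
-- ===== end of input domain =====

-- B replaces A's index-driven nested-while grouping by a single run-forming pass
-- (merge consecutive import lines into runs, then flatten, sorting import runs): idiomatic, same cost.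

-- ===== PORT A =====
-- helper _ensure_trailing_newline
def pvEnsureNL (text : String) : String :=
  if PySem.Str.endswith text "\n" then text else text ++ "\n"

-- termination measures (cited by the ports' decreasing_by)
theorem pvDecStep (a i : Nat) (h : i < a) : a - (i + 1) < a - i := by omega
theorem pvDecJump (a i j : Nat) (h : i < a) (h2 : i + 1 ≤ j) : a - j < a - i := by omega

-- inner 'while' of A: extends block with consecutive import lines, returns (block, index)
def pvInnerA (lines : List String) (block : List String) (index : Nat) : List String × Nat :=
  if h : index < lines.length then
    let next_line := lines[index]
    let next_stripped := PySem.Str.lstrip next_line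
    if PySem.Str.strip next_line = "" then (block, index)
    else if PySem.Str.startswith next_stripped "import " || PySem.Str.startswith next_stripped "from " then
      pvInnerA lines (block ++ [next_line]) (index + 1)
    else (block, index)
  else (block, index)
termination_by lines.length - index
decreasing_by exact pvDecStep _ _ h

-- the inner while never moves index backwards (needed for the outer loop's termination)
theorem pvInnerA_ge (lines : List String) (block : List String) (index : Nat) :
    index ≤ (pvInnerA lines block index).2 := by
  fun_induction pvInnerA with
  | case1 => simp
  | case2 => omega
  | case3 => simp
  | case4 => simp

-- outer 'while' of A
def pvOuterA (lines : List String) (output : List String) (index : Nat) : List String :=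
  if h : index < lines.length then
    let line := lines[index]
    let stripped := PySem.Str.lstrip line
    if PySem.Str.startswith stripped "import " || PySem.Str.startswith stripped "from " then
      let r := pvInnerA lines [line] (index + 1)
      pvOuterA lines
        (output ++ PySem.List.sorted r.1 (fun item => PySem.Str.lower (PySem.Str.strip item)) false) r.2
    else
      pvOuterA lines (output ++ [line]) (index + 1)
  else output
termination_by lines.length - index
decreasing_by
  · exact pvDecJump _ _ _ h (pvInnerA_ge lines [lines[index]] (index + 1))
  · exact pvDecStep _ _ h

def fallback_sort_imports_py (source : String) : String :=
  let lines := PySem.Str.splitlines source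
  let output := pvOuterA lines [] 0
  pvEnsureNL (PySem.Str.join "\n" output)

-- ===== PORT B =====
-- helper is_import
def pvIsImportB (line : String) : Bool :=
  PySem.Str.startswith (PySem.Str.lstrip line) "import " ||
  PySem.Str.startswith (PySem.Str.lstrip line) "from "

-- one step of B's run-forming loop
def pvStepB (runs : List (Bool × List String)) (line : String) : List (Bool × List String) :=
  let flag := pvIsImportB line
  match runs.getLast? with
  | some (f, chunk) =>
      if flag && f then runs.dropLast ++ [(f, chunk ++ [line])]
      else runs ++ [(flag, [line])]
  | none => [(flag, [line])]

def fallback_sort_imports_py_alt (source : String) : String :=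
  let runs := (PySem.Str.splitlines source).foldl pvStepB []
  let out := runs.foldl (fun out fc =>
    out ++ (if fc.1 then PySem.List.sorted fc.2 (fun s => PySem.Str.lower (PySem.Str.strip s)) false
            else fc.2)) []
  let text := PySem.Str.join "\n" out
  if PySem.Str.endswith text "\n" then text else text ++ "\n"

-- ===== PRECONDITION & SPEC =====
def Spec_fallback_sort_imports_py (source : String) (out : String) : Prop := out = fallback_sort_imports_py_alt source
instance (source : String) (out : String) : Decidable (Spec_fallback_sort_imports_py source out) := by unfold Spec_fallback_sort_imports_py; infer_instance

-- ===== CLAIM (what is proved, stated in full; the proofs are below) =====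
def Claim_equal_fallback_sort_imports_py : Prop := ∀ (source : String), Dom_fallback_sort_imports_py source → Spec_fallback_sort_imports_py source (fallback_sort_imports_py source)

-- ===== LEMMAS AND PROOFS =====

-- termination measures for the proof-side grouping functions
theorem pvDecDropWhile (p : String → Bool) (l : String) (ls : List String) :
    (ls.dropWhile p).length < (l :: ls).length := by
  simpa using Nat.lt_succ_of_le (List.length_dropWhile_le p ls)
theorem pvDecTail (l : String) (ls : List String) : ls.length < (l :: ls).length := by simp

-- common reference grouping: maximal runs of consecutive import lines get sorted, other lines pass through
def pvGroup : List String → List String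
  | [] => []
  | l :: ls =>
    if pvIsImportB l then
      PySem.List.sorted (l :: ls.takeWhile pvIsImportB)
        (fun item => PySem.Str.lower (PySem.Str.strip item)) false
        ++ pvGroup (ls.dropWhile pvIsImportB)
    else l :: pvGroup ls
termination_by xs => xs.length
decreasing_by
  · exact pvDecDropWhile _ _ _
  · exact pvDecTail _ _

-- a whitespace-only line is not an import line
theorem pvBlank_not_import (l : String) (h : PySem.Str.strip l = "") : pvIsImportB l = false := by
  have h1 : PySem.Chars.rstrip (PySem.Chars.lstrip l.toList) = [] := by
    have := congrArg String.toList h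
    simpa [PySem.Str.strip, PySem.Chars.strip] using this
  have h2 : PySem.Chars.lstrip l.toList = [] := by
    rcases hc : PySem.Chars.lstrip l.toList with _ | ⟨a, t⟩
    · rfl
    · exfalso
      have hne : List.dropWhile PySem.Chars.isspace l.toList ≠ [] := by
        rw [PySem.Chars.lstrip] at hc; rw [hc]; simp
      have ha : PySem.Chars.isspace a = false := by
        have := List.head_dropWhile_not PySem.Chars.isspace hne
        rw [PySem.Chars.lstrip] at hc
        simpa [hc] using this
      rw [hc, PySem.Chars.rstrip] at h1
      have h3 : List.dropWhile PySem.Chars.isspace (a :: t).reverse = [] := by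
        simpa using congrArg List.reverse h1
      have := (List.dropWhile_eq_nil_iff.mp h3) a (by simp)
      rw [ha] at this; exact absurd this (by simp)
  simp [pvIsImportB, PySem.Str.startswith_eq, PySem.Str.toList_lstrip, h2, PySem.Chars.startswith]

-- A's inner while collects exactly the maximal import-run prefix
theorem pvInnerA_spec (lines : List String) (block : List String) (index : Nat) :
    pvInnerA lines block index =
      (block ++ (lines.drop index).takeWhile pvIsImportB,
       index + ((lines.drop index).takeWhile pvIsImportB).length) := by
  fun_induction pvInnerA
  case case1 =>
    rename_i block index hlt nl hb
    have himB : pvIsImportB lines[index] = false := pvBlank_not_import _ hb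
    rw [List.drop_eq_getElem_cons hlt]
    simp [himB]
  case case2 =>
    rename_i block index hlt nl ns hb him ih
    have himB : pvIsImportB lines[index] = true := him
    rw [ih, List.drop_eq_getElem_cons hlt]
    simp only [List.takeWhile_cons, himB, if_true, List.length_cons, Prod.mk.injEq]
    refine ⟨by simp; rfl, by omega⟩
  case case3 =>
    rename_i block index hlt nl ns hb him
    have himB : pvIsImportB lines[index] = false := Bool.eq_false_iff.mpr him
    rw [List.drop_eq_getElem_cons hlt]
    simp [himB]
  case case4 =>
    rename_i block index h
    rw [List.drop_eq_nil_of_le (Nat.le_of_not_lt h)]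
    simp

-- drop by the takeWhile length is dropWhile
theorem pvDropLen (p : String → Bool) (l : List String) :
    l.drop (l.takeWhile p).length = l.dropWhile p := by
  induction l with
  | nil => rfl
  | cons a t ih =>
    by_cases h : p a
    · simp [h, ih]
    · simp [h]

-- A's outer loop computes pvGroup of the remaining lines
theorem pvOuterA_spec (lines : List String) (output : List String) (index : Nat) :
    pvOuterA lines output index = output ++ pvGroup (lines.drop index) := by
  fun_induction pvOuterA
  case case1 =>
    rename_i output index hlt line stripped him r ih
    have himB : pvIsImportB lines[index] = true := him
    have hr : r = ([line] ++ List.takeWhile pvIsImportB (List.drop (index+1) lines),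
        index + 1 + (List.takeWhile pvIsImportB (List.drop (index+1) lines)).length) :=
      pvInnerA_spec lines [line] (index+1)
    have hdw : List.drop (index + 1 + (List.takeWhile pvIsImportB (List.drop (index+1) lines)).length) lines
        = List.dropWhile pvIsImportB (List.drop (index+1) lines) := by
      rw [← List.drop_drop, pvDropLen]
    rw [ih, hr, List.drop_eq_getElem_cons hlt, pvGroup]
    simp [himB, hdw]
    rfl
  case case2 =>
    rename_i output index hlt line stripped him ih
    have himB : pvIsImportB lines[index] = false := Bool.eq_false_iff.mpr him
    rw [ih, List.drop_eq_getElem_cons hlt, pvGroup]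
    simp [himB]
    rfl
  case case3 =>
    rename_i output index h
    rw [List.drop_eq_nil_of_le (Nat.le_of_not_lt h)]
    simp [pvGroup]

-- B's runs, as produced by the fold
def pvRunsOf : List String → List (Bool × List String)
  | [] => []
  | l :: ls =>
    if pvIsImportB l then (true, l :: ls.takeWhile pvIsImportB) :: pvRunsOf (ls.dropWhile pvIsImportB)
    else (false, [l]) :: pvRunsOf ls
termination_by xs => xs.length
decreasing_by
  · exact pvDecDropWhile _ _ _
  · exact pvDecTail _ _

theorem pvFoldB_spec (ls : List String) :
    (∀ (rs : List (Bool × List String)) (c : List String),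
        ls.foldl pvStepB (rs ++ [(true, c)]) =
          rs ++ (true, c ++ ls.takeWhile pvIsImportB) :: pvRunsOf (ls.dropWhile pvIsImportB)) ∧
    (∀ (rs : List (Bool × List String)),
        (rs = [] ∨ ∃ rs' c, rs = rs' ++ [(false, c)]) →
        ls.foldl pvStepB rs = rs ++ pvRunsOf ls) := by
  induction ls with
  | nil =>
    constructor
    · intro rs c; simp [pvRunsOf]
    · intro rs _; simp [pvRunsOf]
  | cons l ls ih =>
    obtain ⟨ih1, ih2⟩ := ih
    constructor
    · intro rs c
      rw [List.foldl_cons]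
      by_cases hf : pvIsImportB l = true
      · have hstep : pvStepB (rs ++ [(true, c)]) l = rs ++ [(true, c ++ [l])] := by
          simp [pvStepB, hf]
        rw [hstep, ih1]
        simp [hf]
      · have hstep : pvStepB (rs ++ [(true, c)]) l = rs ++ [(true, c)] ++ [(false, [l])] := by
          simp [pvStepB, Bool.eq_false_iff.mpr hf]
        rw [hstep, ih2 (rs ++ [(true, c)] ++ [(false, [l])]) (Or.inr ⟨rs ++ [(true, c)], [l], rfl⟩)]
        simp only [List.takeWhile_cons, List.dropWhile_cons, Bool.eq_false_iff.mpr hf,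
          Bool.false_eq_true, if_false]
        rw [pvRunsOf]
        simp [hf]
    · intro rs hrs
      rw [List.foldl_cons]
      rcases hrs with rfl | ⟨rs', c', rfl⟩
      · by_cases hf : pvIsImportB l = true
        · have hstep : pvStepB [] l = [] ++ [(true, [l])] := by simp [pvStepB, hf]
          rw [hstep, ih1 [] [l], pvRunsOf]
          simp [hf]
        · have hstep : pvStepB [] l = [] ++ [(false, [l])] := by
            simp [pvStepB, Bool.eq_false_iff.mpr hf]
          rw [hstep, ih2 ([] ++ [(false, [l])]) (Or.inr ⟨[], [l], rfl⟩), pvRunsOf]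
          simp [hf]
      · have hstep : pvStepB (rs' ++ [(false, c')]) l =
            rs' ++ [(false, c')] ++ [(pvIsImportB l, [l])] := by
          simp [pvStepB]
        rw [hstep]
        by_cases hf : pvIsImportB l = true
        · rw [hf, ih1 (rs' ++ [(false, c')]) [l], pvRunsOf]
          simp [hf]
        · rw [Bool.eq_false_iff.mpr hf,
            ih2 (rs' ++ [(false, c')] ++ [(false, [l])]) (Or.inr ⟨rs' ++ [(false, c')], [l], rfl⟩),
            pvRunsOf]
          simp [hf]

-- flattening B's runs gives pvGroup
theorem pvFlatten_spec (ls : List String) :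
    (pvRunsOf ls).flatMap (fun fc =>
        if fc.1 then PySem.List.sorted fc.2 (fun s => PySem.Str.lower (PySem.Str.strip s)) false
        else fc.2) = pvGroup ls := by
  fun_induction pvRunsOf
  case case1 => simp [pvGroup]
  case case2 =>
    rename_i l ls hf ih
    rw [pvGroup]
    simp [hf, ih]
  case case3 =>
    rename_i l ls hf ih
    rw [pvGroup]
    simp [hf, ih]

-- ===== VERDICT (by name: the statement is the Claim_ definition above) =====
theorem fallback_sort_imports_py_spec : Claim_equal_fallback_sort_imports_py := by
  intro source _
  show _ = _
  simp only [fallback_sort_imports_py, fallback_sort_imports_py_alt, pvEnsureNL]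
  rw [pvOuterA_spec, (pvFoldB_spec (PySem.Str.splitlines source)).2 [] (Or.inl rfl),
      PySem.List.foldl_append_eq_flatMap]
  simp only [List.nil_append, List.drop_zero]
  rw [pvFlatten_spec]
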